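-- pv_equiv track=rewrite | github.com/abossard/circuithack | ports/codee/wokwi/codee/game_chess.py | _square_attacked
-- ===== SOURCE A (Python) =====
-- KNIGHT_OFFSETS = [
--     (-2, -1),
--     (-2, 1),
--     (-1, -2),
--     (-1, 2),
--     (1, -2),
--     (1, 2),
--     (2, -1),
--     (2, 1),
-- ]
--
-- KING_OFFSETS = [
--     (-1, -1),
--     (-1, 0),
--     (-1, 1),
--     (0, -1),
--     (0, 1),
--     (1, -1),
--     (1, 0),
--     (1, 1),
-- ]
--
-- DIAGONAL_DIRS = [(-1, -1), (-1, 1), (1, -1), (1, 1)]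
--
-- ORTHO_DIRS = [(-1, 0), (1, 0), (0, -1), (0, 1)]
--
-- def in_bounds(x: int, y: int) -> bool:
--     return 0 <= x < 8 and 0 <= y < 8
--
-- def _square_attacked(board: list[list[str]], x: int, y: int, by_side: str) -> bool:
--     pawn_dir = -1 if by_side == "w" else 1
--     pawn_piece = "P" if by_side == "w" else "p"
--     for dx in (-1, 1):
--         px = x + dx
--         py = y + pawn_dir
--         if in_bounds(px, py) and board[py][px] == pawn_piece:
--             return True
--
--     knight_piece = "N" if by_side == "w" else "n"
--     for dx, dy in KNIGHT_OFFSETS: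
--         nx = x + dx
--         ny = y + dy
--         if in_bounds(nx, ny) and board[ny][nx] == knight_piece:
--             return True
--
--     bishop_piece = "B" if by_side == "w" else "b"
--     rook_piece = "R" if by_side == "w" else "r"
--     queen_piece = "Q" if by_side == "w" else "q"
--     king_piece = "K" if by_side == "w" else "k"
--
--     for dx, dy in DIAGONAL_DIRS:
--         nx = x + dx
--         ny = y + dy
--         while in_bounds(nx, ny):
--             p = board[ny][nx]
--             if p != ".":
--                 if p in {bishop_piece, queen_piece}:
--                     return True
--                 break
--             nx += dx
--             ny += dy
--
--     for dx, dy in ORTHO_DIRS: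
--         nx = x + dx
--         ny = y + dy
--         while in_bounds(nx, ny):
--             p = board[ny][nx]
--             if p != ".":
--                 if p in {rook_piece, queen_piece}:
--                     return True
--                 break
--             nx += dx
--             ny += dy
--
--     for dx, dy in KING_OFFSETS:
--         nx = x + dx
--         ny = y + dy
--         if in_bounds(nx, ny) and board[ny][nx] == king_piece:
--             return True
--
--     return False
-- ===== SOURCE B (Python) =====
-- KNIGHT_OFFSETS = [
--     (-2, -1),
--     (-2, 1),
--     (-1, -2),
--     (-1, 2),
--     (1, -2),
--     (1, 2),
--     (2, -1),
--     (2, 1),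
-- ]
--
-- DIAGONAL_DIRS = [(-1, -1), (-1, 1), (1, -1), (1, 1)]
--
-- ORTHO_DIRS = [(-1, 0), (1, 0), (0, -1), (0, 1)]
--
--
-- def _square_attacked(board: list[list[str]], x: int, y: int, by_side: str) -> bool:
--     white = by_side == "w"
--     pawn_dir = -1 if white else 1
--
--     def pc(c):
--         return c.upper() if white else c
--
--     def look(px, py):
--         if 0 <= px < 8 and 0 <= py < 8:
--             return board[py][px]
--         return None
--
--     for dx, dy in DIAGONAL_DIRS + ORTHO_DIRS:
--         diag = dx != 0 and dy != 0
--         s = 1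
--         while True:
--             p = look(x + dx * s, y + dy * s)
--             if p is None:
--                 break
--             if p != ".":
--                 if diag:
--                     if p == pc("b") or p == pc("q"):
--                         return True
--                     if s == 1 and (p == pc("k") or (p == pc("p") and dy == pawn_dir)):
--                         return True
--                 else:
--                     if p == pc("r") or p == pc("q"):
--                         return True
--                     if s == 1 and p == pc("k"):
--                         return True
--                 break
--             s += 1
--
--     for dx, dy in KNIGHT_OFFSETS:
--         if look(x + dx, y + dy) == pc("n"):
--             return True
--
--     return False
-- ===== Notes on version B (the rewrite author's own statement) =====
-- stated objective: simpler
-- what changed: The five separate passes (pawn, knight, bishop/queen rays, rook/queen rays, king) are merged into one walk over the eight ray directions whose first step also detects king contact and pawn attacks (when dy equals the pawn direction), followed by the knight pass; an Optional-returning cell lookup replaces the in_bounds/index pair.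
-- outside the precondition, e.g. on _square_attacked([], -2, -2, 'w'): A returns False, B returns False
import Mathlib
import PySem

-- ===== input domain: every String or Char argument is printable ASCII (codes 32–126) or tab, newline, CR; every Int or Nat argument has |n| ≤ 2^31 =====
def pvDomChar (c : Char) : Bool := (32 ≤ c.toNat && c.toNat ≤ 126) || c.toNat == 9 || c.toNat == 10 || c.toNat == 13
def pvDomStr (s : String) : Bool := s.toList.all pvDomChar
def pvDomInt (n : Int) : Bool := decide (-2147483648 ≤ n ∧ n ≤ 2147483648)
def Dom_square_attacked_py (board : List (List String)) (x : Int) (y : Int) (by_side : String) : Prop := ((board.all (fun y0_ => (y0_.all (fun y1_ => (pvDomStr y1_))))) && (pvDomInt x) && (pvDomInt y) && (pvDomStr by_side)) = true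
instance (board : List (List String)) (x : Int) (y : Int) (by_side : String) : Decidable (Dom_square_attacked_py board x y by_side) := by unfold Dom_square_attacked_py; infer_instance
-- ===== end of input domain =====

-- B merges A's five passes into one walk over the eight ray directions (first step also
-- detects king contact and pawn attacks) plus the knight pass: simpler, same cost.

-- ===== PORT A =====
def pvKnightOffsets : List (Int × Int) :=
  [(-2, -1), (-2, 1), (-1, -2), (-1, 2), (1, -2), (1, 2), (2, -1), (2, 1)]
def pvKingOffsets : List (Int × Int) :=
  [(-1, -1), (-1, 0), (-1, 1), (0, -1), (0, 1), (1, -1), (1, 0), (1, 1)]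
def pvDiagDirs : List (Int × Int) := [(-1, -1), (-1, 1), (1, -1), (1, 1)]
def pvOrthoDirs : List (Int × Int) := [(-1, 0), (1, 0), (0, -1), (0, 1)]

def pvInb (x y : Int) : Bool := decide (0 ≤ x) && decide (x < 8) && decide (0 ≤ y) && decide (y < 8)

-- board[py][px]; exact on Pre_ (both indices then in range), "" default elsewhere
def pvCell (board : List (List String)) (px py : Int) : String :=
  (PySem.List.pyGet? ((PySem.List.pyGet? board py).getD []) px).getD ""

-- A's while-walk from square (nx,ny) in direction (dx,dy); fuel 8 covers every
-- in-bounds step (the coordinate moves by 1 inside 0..7), beyond that in_bounds is false anyway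
def pvRayA (board : List (List String)) (p1 p2 : String) (dx dy : Int) :
    Nat → Int → Int → Bool
  | 0, _, _ => false
  | f + 1, nx, ny =>
    if pvInb nx ny then
      let p := pvCell board nx ny
      if p != "." then (p == p1 || p == p2)
      else pvRayA board p1 p2 dx dy f (nx + dx) (ny + dy)
    else false

def square_attacked_py (board : List (List String)) (x : Int) (y : Int) (by_side : String) : Bool :=
  let pawn_dir : Int := if by_side == "w" then -1 else 1
  let pawn_piece : String := if by_side == "w" then "P" else "p"
  if ([(-1 : Int), 1].any fun dx =>
      pvInb (x + dx) (y + pawn_dir) && (pvCell board (x + dx) (y + pawn_dir) == pawn_piece)) then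
    true
  else
    let knight_piece : String := if by_side == "w" then "N" else "n"
    if (pvKnightOffsets.any fun d =>
        pvInb (x + d.1) (y + d.2) && (pvCell board (x + d.1) (y + d.2) == knight_piece)) then
      true
    else
      let bishop_piece : String := if by_side == "w" then "B" else "b"
      let rook_piece : String := if by_side == "w" then "R" else "r"
      let queen_piece : String := if by_side == "w" then "Q" else "q"
      let king_piece : String := if by_side == "w" then "K" else "k"
      if (pvDiagDirs.any fun d =>
          pvRayA board bishop_piece queen_piece d.1 d.2 8 (x + d.1) (y + d.2)) then
        true
      else if (pvOrthoDirs.any fun d =>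
          pvRayA board rook_piece queen_piece d.1 d.2 8 (x + d.1) (y + d.2)) then
        true
      else if (pvKingOffsets.any fun d =>
          pvInb (x + d.1) (y + d.2) && (pvCell board (x + d.1) (y + d.2) == king_piece)) then
        true
      else false

-- ===== PORT B =====
def pvPc (white : Bool) (c : String) : String := if white then PySem.Str.upper c else c

-- Source B's look(px, py)
def pvLook (board : List (List String)) (px py : Int) : Option String :=
  if pvInb px py then some (pvCell board px py) else none

-- Source B's inner while-walk at distance s; fuel 8 for the same reason as pvRayA
def pvRayB (board : List (List String)) (white diag : Bool) (pawn_dir dx dy x y : Int) :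
    Nat → Int → Bool
  | 0, _ => false
  | f + 1, s =>
    match pvLook board (x + dx * s) (y + dy * s) with
    | none => false
    | some p =>
      if p != "." then
        if diag then
          (p == pvPc white "b" || p == pvPc white "q") ||
          (s == (1 : Int) && (p == pvPc white "k" || (p == pvPc white "p" && dy == pawn_dir)))
        else
          (p == pvPc white "r" || p == pvPc white "q") ||
          (s == (1 : Int) && p == pvPc white "k")
      else pvRayB board white diag pawn_dir dx dy x y f (s + 1)

def square_attacked_py_alt (board : List (List String)) (x : Int) (y : Int) (by_side : String) : Bool :=
  let white := by_side == "w"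
  let pawn_dir : Int := if white then -1 else 1
  if ((pvDiagDirs ++ pvOrthoDirs).any fun d =>
      pvRayB board white (d.1 != 0 && d.2 != 0) pawn_dir d.1 d.2 x y 8 1) then
    true
  else if (pvKnightOffsets.any fun d =>
      pvLook board (x + d.1) (y + d.2) == some (pvPc white "n")) then
    true
  else false

-- ===== PRECONDITION & SPEC =====
-- Pre_ excludes boards that are not at least 8×8 while (x,y) is within piece range of the
-- 8×8 area: on such inputs A's board[py][px] can raise IndexError. When (x,y) is more than
-- 2 away from the area no square is ever read, so any board shape is admitted there.
def Pre_square_attacked_py (board : List (List String)) (x : Int) (y : Int) (by_side : String) : Prop :=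
  (8 ≤ board.length ∧ ∀ row ∈ board, 8 ≤ row.length)
  ∨ (x < -2 ∨ 9 < x ∨ y < -2 ∨ 9 < y)
instance (board : List (List String)) (x : Int) (y : Int) (by_side : String) : Decidable (Pre_square_attacked_py board x y by_side) := by unfold Pre_square_attacked_py; infer_instance

def pvWitness_square_attacked_py : List (List String) × Int × Int × String :=
  (List.replicate 8 (List.replicate 8 "."), 4, 4, "w")

def Spec_square_attacked_py (board : List (List String)) (x : Int) (y : Int) (by_side : String) (out : Bool) : Prop := out = square_attacked_py_alt board x y by_side
instance (board : List (List String)) (x : Int) (y : Int) (by_side : String) (out : Bool) : Decidable (Spec_square_attacked_py board x y by_side out) := by unfold Spec_square_attacked_py; infer_instance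

-- ===== CLAIM (what is proved, stated in full; the proofs are below) =====
def Claim_equal_square_attacked_py : Prop := ∀ (board : List (List String)) (x : Int) (y : Int) (by_side : String), Dom_square_attacked_py board x y by_side → Pre_square_attacked_py board x y by_side → Spec_square_attacked_py board x y by_side (square_attacked_py board x y by_side)

-- ===== LEMMAS AND PROOFS =====

theorem pv_ite_or (c b : Bool) : (if c then true else b) = (c || b) := by cases c <;> rfl

@[simp] theorem pv_pc_b : pvPc true "b" = "B" := by decide
@[simp] theorem pv_pc_q : pvPc true "q" = "Q" := by decide
@[simp] theorem pv_pc_r : pvPc true "r" = "R" := by decide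
@[simp] theorem pv_pc_k : pvPc true "k" = "K" := by decide
@[simp] theorem pv_pc_p : pvPc true "p" = "P" := by decide
@[simp] theorem pv_pc_n : pvPc true "n" = "N" := by decide
@[simp] theorem pv_pc_false (c : String) : pvPc false c = c := rfl

theorem pv_dot_ne (w : Bool) (c : String) (hc : "." ≠ c) (hu : "." ≠ PySem.Str.upper c) :
    ("." == pvPc w c) = false := by
  cases w <;> simp [pvPc, hc, hu]

theorem pv_look_eq (board : List (List String)) (a b : Int) (v : String) :
    (pvLook board a b == some v) = (pvInb a b && (pvCell board a b == v)) := by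
  unfold pvLook
  cases h : pvInb a b <;> simp

theorem pv_rayB_tail (board : List (List String)) (white diag : Bool) (pd dx dy x y : Int) :
    ∀ (f : Nat) (s : Int), 2 ≤ s →
      pvRayB board white diag pd dx dy x y f s =
        pvRayA board (pvPc white (if diag then "b" else "r")) (pvPc white "q") dx dy f
          (x + dx * s) (y + dy * s) := by
  intro f
  induction f with
  | zero => intro s hs; rfl
  | succ f ih =>
    intro s hs
    have h1 : (s == (1 : Int)) = false := by
      have hne : s ≠ 1 := by omega
      simpa using hne
    cases hb : pvInb (x + dx * s) (y + dy * s) with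
    | false => simp only [pvRayB, pvRayA, pvLook, hb, if_neg Bool.false_ne_true]
    | true =>
      simp only [pvRayB, pvRayA, pvLook, hb, if_true, h1, Bool.false_and, Bool.or_false]
      by_cases hp : pvCell board (x + dx * s) (y + dy * s) = "."
      · simp only [hp, bne_self_eq_false, if_neg Bool.false_ne_true]
        have := ih (s + 1) (by omega)
        rw [this]
        congr 1 <;> ring
      · have hbne : (pvCell board (x + dx * s) (y + dy * s) != ".") = true := by
          simpa using hp
        simp only [hbne, if_true]
        cases diag <;> rfl

set_option maxHeartbeats 2000000 in
theorem pv_rayB_first (board : List (List String)) (white diag : Bool) (pd dx dy x y : Int) :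
    pvRayB board white diag pd dx dy x y 8 1 =
      (pvRayA board (pvPc white (if diag then "b" else "r")) (pvPc white "q") dx dy 8
          (x + dx) (y + dy)
        || (pvInb (x + dx) (y + dy) && (pvCell board (x + dx) (y + dy) == pvPc white "k"))
        || (diag && (dy == pd) &&
            (pvInb (x + dx) (y + dy) && (pvCell board (x + dx) (y + dy) == pvPc white "p")))) := by
  have e1 : x + dx * 1 = x + dx := by ring
  have e2 : y + dy * 1 = y + dy := by ring
  rw [show (8 : Nat) = 7 + 1 from rfl]
  generalize (7 : Nat) = f
  cases hb : pvInb (x + dx) (y + dy) with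
  | false =>
    simp only [pvRayB, pvRayA, pvLook, e1, e2, hb, if_neg Bool.false_ne_true,
      Bool.false_and, Bool.and_false, Bool.or_false]
  | true =>
    simp only [pvRayB, pvRayA, pvLook, e1, e2, hb, if_true, Bool.true_and]
    by_cases hp : pvCell board (x + dx) (y + dy) = "."
    · simp only [hp, bne_self_eq_false, if_neg Bool.false_ne_true]
      rw [pv_rayB_tail board white diag pd dx dy x y f (1 + 1) (by omega)]
      have hk : ("." == pvPc white "k") = false := pv_dot_ne white "k" (by decide) (by decide)
      have hpw : ("." == pvPc white "p") = false := pv_dot_ne white "p" (by decide) (by decide)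
      simp only [hk, hpw, Bool.or_false, Bool.and_false]
      congr 1 <;> ring
    · have hbne : (pvCell board (x + dx) (y + dy) != ".") = true := by simpa using hp
      simp only [hbne, if_true]
      cases diag <;>
      · cases hA : (pvCell board (x + dx) (y + dy) == pvPc white "b") <;>
        cases hB : (pvCell board (x + dx) (y + dy) == pvPc white "q") <;>
        cases hC : (pvCell board (x + dx) (y + dy) == pvPc white "k") <;>
        cases hD : (pvCell board (x + dx) (y + dy) == pvPc white "p") <;>
        cases hR : (pvCell board (x + dx) (y + dy) == pvPc white "r") <;>
        cases hE : (dy == pd) <;>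
        simp [hA, hD, hR]

set_option maxHeartbeats 4000000 in
theorem pv_main (board : List (List String)) (x y : Int) (by_side : String) :
    square_attacked_py board x y by_side = square_attacked_py_alt board x y by_side := by
  cases hw : (by_side == "w") <;>
  · simp only [square_attacked_py, square_attacked_py_alt, hw, if_true, if_neg Bool.false_ne_true,
      pv_ite_or, List.any_append, List.any_cons, List.any_nil,
      pvDiagDirs, pvOrthoDirs, pvKnightOffsets, pvKingOffsets,
      pv_rayB_first, pv_look_eq]
    norm_num
    have g1 : ((-1 : Int) != 0) = true := by decide
    have g2 : ((1 : Int) != 0) = true := by decide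
    have g3 : ((-1 : Int) == 1) = false := by decide
    have g4 : ((1 : Int) == 1) = true := by decide
    have g5 : ((-1 : Int) == -1) = true := by decide
    have g6 : ((1 : Int) == -1) = false := by decide
    simp only [g1, g2, g3, g4, g5, g6, Bool.true_and, Bool.false_and, Bool.and_false,
      Bool.and_true, Bool.or_false, Bool.false_or]
    ac_rfl

-- ===== VERDICT (by name: the statement is the Claim_ definition above) =====
theorem square_attacked_py_spec : Claim_equal_square_attacked_py := by
  intro board x y by_side _ _
  exact pv_main board x y by_side
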